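-- pv_equiv track=rewrite | github.com/ItaloVicente/Clone-in-Code-Review | CROP Update/7_git_repo.py | get_untracked_items
-- ===== SOURCE A (Python) =====
-- def get_untracked_items(git_status):
--     untracked_line_flag = False
--     untracked_flag = False
--     untracked_items = []
--
--     for line in git_status:
--         if untracked_flag == False:
--             if "Untracked files" in line:
--                 untracked_line_flag = True
--             if untracked_line_flag == True and line == "":
--                 untracked_flag = True
--         elif untracked_flag == True:
--             if line == "":
--                 break
--             else:
--                 untracked_items.append(line)
--
--     return untracked_items
-- ===== SOURCE B (Python) =====
-- def get_untracked_items(git_status):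
--     it = iter(git_status)
--     for line in it:
--         if "Untracked files" in line:
--             break
--     else:
--         return []
--     for line in it:
--         if line == "":
--             break
--     else:
--         return []
--     result = []
--     for line in it:
--         if line == "":
--             break
--         result.append(line)
--     return result
-- ===== Notes on version B (the rewrite author's own statement) =====
-- stated objective: simpler
-- what changed: Replaced the single loop with two boolean flags by three sequential scanning phases over one shared iterator (find header, skip to blank line, collect until blank), removing all flag state.
import Mathlib
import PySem

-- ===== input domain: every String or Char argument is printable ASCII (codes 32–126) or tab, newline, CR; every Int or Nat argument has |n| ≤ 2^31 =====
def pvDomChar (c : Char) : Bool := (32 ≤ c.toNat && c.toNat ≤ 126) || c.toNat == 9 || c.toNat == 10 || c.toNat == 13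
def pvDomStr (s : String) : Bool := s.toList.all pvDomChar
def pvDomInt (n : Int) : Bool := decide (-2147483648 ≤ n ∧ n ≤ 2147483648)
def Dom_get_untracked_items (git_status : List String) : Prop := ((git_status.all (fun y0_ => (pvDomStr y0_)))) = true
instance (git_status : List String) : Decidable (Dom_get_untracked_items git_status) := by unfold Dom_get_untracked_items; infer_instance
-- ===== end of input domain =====

-- B replaces A's one loop with two boolean flags by three sequential scanning phases (simpler).

-- ===== PORT A =====
-- A's loop with state (untracked_line_flag, untracked_flag, untracked_items); `break` = return items
def getUntrackedGo (rest : List String) (lineFlag untrackedFlag : Bool)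
    (items : List String) : List String :=
  match rest with
  | [] => items
  | line :: rest =>
    if untrackedFlag = false then
      let lineFlag' := if PySem.Str.isIn "Untracked files" line then true else lineFlag
      let untrackedFlag' := if lineFlag' = true ∧ line = "" then true else untrackedFlag
      getUntrackedGo rest lineFlag' untrackedFlag' items
    else
      if line = "" then items
      else getUntrackedGo rest lineFlag untrackedFlag (items ++ [line])

def get_untracked_items (git_status : List String) : List String :=
  getUntrackedGo git_status false false []

-- ===== PORT B =====
-- phase 3: collect until the first blank line
def altCollect (rest : List String) : List String :=
  match rest with
  | [] => []
  | line :: rest => if line = "" then [] else line :: altCollect rest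

-- phase 2: skip to the blank line after the header; for/else returns []
def altSkip (rest : List String) : List String :=
  match rest with
  | [] => []
  | line :: rest => if line = "" then altCollect rest else altSkip rest

-- phase 1: find the "Untracked files" header; for/else returns []
def altFind (rest : List String) : List String :=
  match rest with
  | [] => []
  | line :: rest => if PySem.Str.isIn "Untracked files" line then altSkip rest else altFind rest

def get_untracked_items_alt (git_status : List String) : List String :=
  altFind git_status

-- ===== PRECONDITION & SPEC =====
def Spec_get_untracked_items (git_status : List String) (out : List String) : Prop := out = get_untracked_items_alt git_status
instance (git_status : List String) (out : List String) : Decidable (Spec_get_untracked_items git_status out) := by unfold Spec_get_untracked_items; infer_instance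

-- ===== CLAIM (what is proved, stated in full; the proofs are below) =====
def Claim_equal_get_untracked_items : Prop := ∀ (git_status : List String), Dom_get_untracked_items git_status → Spec_get_untracked_items git_status (get_untracked_items git_status)

-- ===== LEMMAS AND PROOFS =====

-- A line containing the nonempty substring "Untracked files" is not empty.
theorem isIn_ne_empty (line : String) (h : PySem.Str.isIn "Untracked files" line = true) :
    line ≠ "" := by
  intro he; subst he
  have := (PySem.Str.isIn_iff_infix (sub := "Untracked files") (s := "")).mp h
  simp at this

-- In the collection phase, A appends onto items what B's third phase collects.
theorem go_collect (rest : List String) (lf : Bool) (items : List String) :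
    getUntrackedGo rest lf true items = items ++ altCollect rest := by
  induction rest generalizing items with
  | nil => simp [getUntrackedGo, altCollect]
  | cons line rest ih =>
    by_cases h : line = "" <;> simp [getUntrackedGo, altCollect, h, ih]

-- After the header was seen, A's loop is B's second phase.
theorem go_skip (rest : List String) :
    getUntrackedGo rest true false [] = altSkip rest := by
  induction rest with
  | nil => rfl
  | cons line rest ih =>
    by_cases h : line = ""
    · simp [getUntrackedGo, altSkip, h, go_collect]
    · by_cases hin : PySem.Str.isIn "Untracked files" line = true <;>
        simp only [PySem.Str.isIn, Bool.not_eq_true] at hin <;>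
        rw [show "Untracked files".toList = ['U','n','t','r','a','c','k','e','d',' ','f','i','l','e','s'] from rfl] at hin <;>
        simp [getUntrackedGo, altSkip, h, hin, ih]

-- Before the header was seen, A's loop is B's first phase.
theorem go_find (rest : List String) :
    getUntrackedGo rest false false [] = altFind rest := by
  induction rest with
  | nil => rfl
  | cons line rest ih =>
    by_cases hin : PySem.Str.isIn "Untracked files" line = true
    · have hne := isIn_ne_empty line hin
      simp only [PySem.Str.isIn] at hin
      rw [show "Untracked files".toList = ['U','n','t','r','a','c','k','e','d',' ','f','i','l','e','s'] from rfl] at hin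
      simp [getUntrackedGo, altFind, hin, hne, go_skip]
    · simp only [PySem.Str.isIn] at hin
      rw [Bool.not_eq_true] at hin
      rw [show "Untracked files".toList = ['U','n','t','r','a','c','k','e','d',' ','f','i','l','e','s'] from rfl] at hin
      by_cases h : line = ""
      · subst h
        simp [getUntrackedGo, altFind,
          show PySem.Chars.isIn ['U','n','t','r','a','c','k','e','d',' ','f','i','l','e','s'] ([] : List Char) = false from rfl, ih]
      · simp [getUntrackedGo, altFind, hin, h, ih]

-- ===== VERDICT (by name: the statement is the Claim_ definition above) =====
theorem get_untracked_items_spec : Claim_equal_get_untracked_items := by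
  intro git_status _
  unfold Spec_get_untracked_items get_untracked_items get_untracked_items_alt
  exact go_find git_status
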